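-- pv_equiv track=rewrite | github.com/WestsideSage/Dodger | src/dodgeball_sim/dynasty_cli.py | _seasons_at_one_club
-- ===== SOURCE A (Python) =====
-- from typing import Dict, List, Optional, Set, Tuple
--
-- def _seasons_at_one_club(rows: List[Dict[str, object]]) -> int:
--     counts: Dict[str, int] = {}
--     for row in rows:
--         club_id = str(row.get("club_id") or "")
--         if not club_id:
--             continue
--         counts[club_id] = counts.get(club_id, 0) + 1
--     return max(counts.values(), default=0)
-- ===== SOURCE B (Python) =====
-- from typing import Dict, List, Optional, Set, Tuple
--
-- def _seasons_at_one_club(rows: List[Dict[str, object]]) -> int: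
--     ids = [cid for cid in (str(row.get("club_id") or "") for row in rows) if cid]
--     ids.sort()
--     best = cur = 0
--     prev = None
--     for cid in ids:
--         cur = cur + 1 if cid == prev else 1
--         if cur > best:
--             best = cur
--         prev = cid
--     return best
-- ===== Notes on version B (the rewrite author's own statement) =====
-- stated objective: alternative
-- what changed: Replaces A's frequency-dictionary tally with a sort-then-scan algorithm: collect the non-empty normalized club ids, sort them, and find the longest run of equal adjacent ids in one linear pass.
import Mathlib
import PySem

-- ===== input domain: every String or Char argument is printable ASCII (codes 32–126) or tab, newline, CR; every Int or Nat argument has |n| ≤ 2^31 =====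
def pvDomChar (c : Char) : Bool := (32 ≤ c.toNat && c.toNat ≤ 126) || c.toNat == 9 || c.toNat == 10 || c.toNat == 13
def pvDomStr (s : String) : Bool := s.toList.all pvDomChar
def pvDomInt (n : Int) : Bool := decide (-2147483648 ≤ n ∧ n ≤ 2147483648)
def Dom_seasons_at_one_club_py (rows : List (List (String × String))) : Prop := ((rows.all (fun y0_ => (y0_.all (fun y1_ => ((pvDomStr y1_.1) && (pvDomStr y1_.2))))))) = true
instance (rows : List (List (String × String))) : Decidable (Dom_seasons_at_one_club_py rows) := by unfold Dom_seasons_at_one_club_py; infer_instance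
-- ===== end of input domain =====

-- B replaces A's frequency-dictionary tally with sort-then-longest-run-of-equal-adjacent-ids (objective: alternative algorithm, same behaviour).


-- ===== PORT A =====
-- shared helper: str(row.get("club_id") or "") — first-match lookup, missing/empty → ""
def pvClubId (row : List (String × String)) : String :=
  (((row.find? (fun p => p.1 == "club_id")).map Prod.snd).getD "")

def seasons_at_one_club_py (rows : List (List (String × String))) : Int :=
  let counts : PySem.Dict String Int :=
    rows.foldl (fun d row =>
      let club_id := pvClubId row
      if club_id = "" then d
      else d.insert club_id (d.getD club_id 0 + 1)) PySem.Dict.empty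
  PySem.List.maxD counts.values (fun v => v) 0

-- ===== PORT B =====
-- one scan step of Source B's run-length loop: state (best, cur, prev)
def pvRunStep (st : Int × Int × Option String) (cid : String) : Int × Int × Option String :=
  let cur := if some cid == st.2.2 then st.2.1 + 1 else 1
  let best := if cur > st.1 then cur else st.1
  (best, cur, some cid)

def seasons_at_one_club_py_alt (rows : List (List (String × String))) : Int :=
  let ids := (rows.map pvClubId).filter (fun c => !(c == ""))
  let s := PySem.List.sorted ids (fun c => c) false
  (s.foldl pvRunStep (0, 0, none)).1

-- ===== PRECONDITION & SPEC =====
def Spec_seasons_at_one_club_py (rows : List (List (String × String))) (out : Int) : Prop := out = seasons_at_one_club_py_alt rows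
instance (rows : List (List (String × String))) (out : Int) : Decidable (Spec_seasons_at_one_club_py rows out) := by unfold Spec_seasons_at_one_club_py; infer_instance

-- ===== CLAIM (what is proved, stated in full; the proofs are below) =====
def Claim_equal_seasons_at_one_club_py : Prop := ∀ (rows : List (List (String × String))), Dom_seasons_at_one_club_py rows → Spec_seasons_at_one_club_py rows (seasons_at_one_club_py rows)

-- ===== LEMMAS AND PROOFS =====

-- the multiset of per-club counts of l, listed over the distinct ids in first-occurrence order
def pvCounts (l : List String) : List Int := (PySem.Set.ofList l).map (fun k => (List.count k l : Int))
-- max of a list of nonnegative ints, 0 for []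
def pvG (l : List Int) : Int := l.foldl max 0

theorem pvG_nonneg (l : List Int) : 0 ≤ pvG l := (PySem.List.le_foldl_max l 0).1

theorem pv_foldl_max_init (l : List Int) (x y : Int) :
    l.foldl max (max x y) = max x (l.foldl max y) := by
  induction l generalizing y with
  | nil => rfl
  | cons z l ih => simpa [List.foldl_cons, max_assoc] using ih (max y z)

theorem pvG_cons (x : Int) (l : List Int) : pvG (x :: l) = max x (pvG l) := by
  have : max 0 x = max x 0 := max_comm _ _
  simp only [pvG, List.foldl_cons, this, pv_foldl_max_init]

theorem pv_maxD_eq_G (l : List Int) (h : ∀ v ∈ l, 0 ≤ v) :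
    PySem.List.maxD l (fun v => v) 0 = pvG l := by
  cases l with
  | nil => rfl
  | cons x t =>
    have hx : 0 ≤ x := h x (by simp)
    simp [PySem.List.maxD, PySem.List.max?_id_cons, pvG, List.foldl_cons,
      max_eq_right hx]

theorem pvG_perm {l₁ l₂ : List Int} (h : l₁.Perm l₂) : pvG l₁ = pvG l₂ :=
  h.foldl_eq 0

-- A's value is the max of the per-club counts
theorem pvA_eq (rows : List (List (String × String))) :
    seasons_at_one_club_py rows
      = pvG (pvCounts ((rows.map pvClubId).filter (fun c => !(c == "")))) := by
  unfold seasons_at_one_club_py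
  rw [show (List.foldl
          (fun (d : PySem.Dict String Int) row =>
            let club_id := pvClubId row
            if club_id = "" then d else d.insert club_id (d.getD club_id 0 + 1))
          PySem.Dict.empty rows)
      = (List.foldl (fun (d : PySem.Dict String Int) c => if c = "" then d else d.insert c (d.getD c 0 + 1))
          PySem.Dict.empty (rows.map pvClubId)) from (List.foldl_map (f := pvClubId)
            (g := fun (d : PySem.Dict String Int) c => if c = "" then d else d.insert c (d.getD c 0 + 1))
            (l := rows) (init := PySem.Dict.empty)).symm]
  rw [show (fun (d : PySem.Dict String Int) c => if c = "" then d else d.insert c (d.getD c 0 + 1))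
      = (fun d c => if ¬ (c = "") then d.insert c (d.getD c 0 + 1) else d) by
    funext d c; by_cases h : c = "" <;> simp [h]]
  rw [PySem.List.foldl_ite_eq_foldl_filter (fun c => ¬ (c = ""))
      (fun (d : PySem.Dict String Int) c => d.insert c (d.getD c 0 + 1))]
  rw [show (fun (c : String) => decide ¬ (c = "")) = (fun c => !(c == "")) by
    funext c; by_cases h : c = "" <;> simp [h]]
  rw [PySem.Dict.foldl_insert_getD_add_one_eq_counter]
  set ids := (rows.map pvClubId).filter (fun c => !(c == "")) with hids
  show PySem.List.maxD ((PySem.Dict.counter ids).items.map Prod.snd) _ _ = _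
  rw [PySem.Dict.items_counter, List.map_map]
  rw [pv_maxD_eq_G]
  · rfl
  · intro v hv
    simp only [List.mem_map] at hv
    obtain ⟨k, _, rfl⟩ := hv
    exact Int.natCast_nonneg _

-- sorted decomposition: a pairwise-≤ list headed by a starts with its whole a-block
theorem pvDecomp (t : List String) (a : String) (hp : (a :: t).Pairwise (· ≤ ·)) :
    ∃ m r, t = List.replicate m a ++ r ∧ a ∉ r ∧ r.Pairwise (· ≤ ·) := by
  induction t with
  | nil => exact ⟨0, [], rfl, by simp, List.Pairwise.nil⟩
  | cons x t' ih =>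
    have hax : a ≤ x := (List.pairwise_cons.mp hp).1 x (by simp)
    have hpt : (x :: t').Pairwise (· ≤ ·) := (List.pairwise_cons.mp hp).2
    by_cases hxa : x = a
    · subst hxa
      have hp' : (x :: t').Pairwise (· ≤ ·) := hpt
      obtain ⟨m, r, h1, h2, h3⟩ := ih (by
        refine List.pairwise_cons.mpr ⟨?_, (List.pairwise_cons.mp hpt).2⟩
        intro y hy; exact (List.pairwise_cons.mp hp).1 y (by simp [hy]))
      exact ⟨m + 1, r, by simp [List.replicate_succ, h1], h2, h3⟩
    · refine ⟨0, x :: t', by simp, ?_, hpt⟩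
      intro hmem
      rcases List.mem_cons.mp hmem with h | h
      · exact hxa h.symm
      · have hxLe : x ≤ a := (List.pairwise_cons.mp hpt).1 a h
        exact hxa (le_antisymm hxLe hax)

-- Set.ofList helpers for the block decomposition
theorem pvAdd_rep (k : Nat) (a : String) :
    (List.replicate k a).foldl PySem.Set.add [a] = [a] := by
  induction k with
  | zero => rfl
  | succ k ih =>
    simpa [List.replicate_succ, List.foldl_cons, PySem.Set.add, PySem.Set.contains] using ih

theorem pvAdd_cons (r : List String) (a : String) (ha : a ∉ r) :
    ∀ acc : List String, r.foldl PySem.Set.add (a :: acc) = a :: r.foldl PySem.Set.add acc := by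
  induction r with
  | nil => intro acc; rfl
  | cons x r' ih =>
    intro acc
    have hxa : x ≠ a := fun h => ha (by simp [h])
    have ha' : a ∉ r' := fun h => ha (by simp [h])
    have hcont : PySem.Set.contains (a :: acc) x = PySem.Set.contains acc x := by
      simp only [PySem.Set.contains, List.contains_cons]
      simp only [List.contains_eq_mem, Bool.or_eq_right_iff_imp, beq_iff_eq, decide_eq_true_eq]
      intro h; exact absurd h hxa
    simp only [List.foldl_cons, PySem.Set.add, hcont]
    cases hc : PySem.Set.contains acc x with
    | true => rw [if_pos rfl, if_pos rfl]; exact ih ha' acc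
    | false =>
      rw [if_neg (by simp), if_neg (by simp), List.cons_append]
      exact ih ha' (acc ++ [x])

theorem pvOfList_block (m : Nat) (a : String) (r : List String) (ha : a ∉ r) :
    PySem.Set.ofList (List.replicate (m + 1) a ++ r) = a :: PySem.Set.ofList r := by
  unfold PySem.Set.ofList
  rw [List.foldl_append]
  have h1 : (List.replicate (m + 1) a).foldl PySem.Set.add PySem.Set.empty = [a] := by
    simpa [List.replicate_succ, List.foldl_cons, PySem.Set.add, PySem.Set.contains,
      PySem.Set.empty] using pvAdd_rep m a
  rw [h1]
  exact pvAdd_cons r a ha ([])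

theorem pvCounts_block (m : Nat) (a : String) (r : List String) (ha : a ∉ r) :
    pvCounts (List.replicate (m + 1) a ++ r) = ((m : Int) + 1) :: pvCounts r := by
  unfold pvCounts
  rw [pvOfList_block m a r ha, List.map_cons]
  congr 1
  · have : List.count a r = 0 := List.count_eq_zero.mpr ha
    simp [List.count_append, this]
  · refine List.map_congr_left ?_
    intro k hk
    have hkr : k ∈ r := (PySem.Set.mem_ofList r k).mp hk
    have hka : k ≠ a := fun h => ha (h ▸ hkr)
    simp only [List.count_append, List.count_replicate]
    have : (a == k) = false := beq_eq_false_iff_ne.mpr (Ne.symm hka)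
    simp [this]

-- one scan step on a fresh id
theorem pvStep_fresh (b cur : Int) (p : Option String) (a : String) (hp : p ≠ some a) :
    pvRunStep (b, cur, p) a = (max b 1, 1, some a) := by
  have h1 : (some a == p) = false := by
    simp only [beq_eq_false_iff_ne]; exact fun h => hp h.symm
  unfold pvRunStep
  rw [h1]
  show ((if (1 : Int) > b then (1 : Int) else b), (1 : Int), some a) = (max b 1, 1, some a)
  have h2 : (if (1 : Int) > b then (1 : Int) else b) = max b 1 := by split_ifs with h <;> omega
  rw [h2]

-- the scan over a block of equal ids
theorem pvBlock (m : Nat) (a : String) (b cur : Int) (hcb : cur ≤ b) :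
    (List.replicate m a).foldl pvRunStep (b, cur, some a)
      = (max b (cur + m), cur + m, some a) := by
  induction m generalizing b cur with
  | zero => simp [max_eq_left hcb]
  | succ m ih =>
    rw [List.replicate_succ, List.foldl_cons]
    have hstep : pvRunStep (b, cur, some a) a = (max b (cur + 1), cur + 1, some a) := by
      unfold pvRunStep
      rw [show (some a == some a) = true by simp]
      show ((if cur + 1 > b then cur + 1 else b), cur + 1, some a) = (max b (cur + 1), cur + 1, some a)
      have h2 : (if cur + 1 > b then cur + 1 else b) = max b (cur + 1) := by split_ifs with h <;> omega
      rw [h2]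
    rw [hstep, ih (max b (cur + 1)) (cur + 1) (le_max_right _ _)]
    simp only [Prod.mk.injEq, and_true]
    omega

-- the full scan of a sorted list computes the max per-id count
theorem pvScan : ∀ (n : Nat) (s : List String), s.length ≤ n → s.Pairwise (· ≤ ·) →
    ∀ (b cur : Int) (p : Option String), (∀ x ∈ s, p ≠ some x) → cur ≤ b → 0 ≤ b →
    (s.foldl pvRunStep (b, cur, p)).1 = max b (pvG (pvCounts s)) := by
  intro n
  induction n with
  | zero =>
    intro s hlen _ b cur p _ hcb hb
    have : s = [] := List.eq_nil_of_length_eq_zero (Nat.le_zero.mp hlen)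
    subst this
    simp [pvCounts, pvG, PySem.Set.ofList, max_eq_left hb]
  | succ n ih =>
    intro s hlen hp b cur p hfresh hcb hb
    cases s with
    | nil => simp [pvCounts, pvG, PySem.Set.ofList, max_eq_left hb]
    | cons a t =>
      obtain ⟨m, r, ht, har, hrp⟩ := pvDecomp t a hp
      subst ht
      rw [List.foldl_cons, pvStep_fresh b cur p a (fun h => hfresh a (by simp) h),
        List.foldl_append, pvBlock m a (max b 1) 1 (le_max_right _ _)]
      have hfr : ∀ x ∈ r, (some a : Option String) ≠ some x := by
        intro x hx h
        exact har (by simpa using (Option.some.inj h) ▸ hx)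
      have hlr : r.length ≤ n := by
        simp only [List.length_cons, List.length_append, List.length_replicate] at hlen
        omega
      rw [ih r hlr hrp (max (max b 1) (1 + m)) (1 + m) (some a) hfr (le_max_right _ _)
        (by omega)]
      have hcounts : pvCounts (a :: (List.replicate m a ++ r)) = ((m : Int) + 1) :: pvCounts r := by
        have : a :: (List.replicate m a ++ r) = List.replicate (m + 1) a ++ r := by
          simp [List.replicate_succ]
        rw [this, pvCounts_block m a r har]
      rw [hcounts, pvG_cons]
      have hg := pvG_nonneg (pvCounts r)
      omega

-- B's value is the same max of per-club counts (of the unsorted id list)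
theorem pvB_eq (rows : List (List (String × String))) :
    seasons_at_one_club_py_alt rows
      = pvG (pvCounts ((rows.map pvClubId).filter (fun c => !(c == "")))) := by
  unfold seasons_at_one_club_py_alt
  set ids := (rows.map pvClubId).filter (fun c => !(c == "")) with hids
  set s := PySem.List.sorted ids (fun c => c) false with hs
  have hperm : s.Perm ids := PySem.List.sorted_perm ids (fun c => c) false
  have hpair : s.Pairwise (· ≤ ·) := PySem.List.sorted_pairwise ids (fun c => c)
  have h1 : (s.foldl pvRunStep (0, 0, none)).1 = max 0 (pvG (pvCounts s)) :=
    pvScan s.length s le_rfl hpair 0 0 none (by intro x _ h; simp at h)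
      le_rfl le_rfl
  have hsetperm : (PySem.Set.ofList s).Perm (PySem.Set.ofList ids) := by
    refine (List.perm_ext_iff_of_nodup (PySem.Set.nodup_ofList s) (PySem.Set.nodup_ofList ids)).mpr ?_
    intro x
    rw [PySem.Set.mem_ofList, PySem.Set.mem_ofList]
    exact hperm.mem_iff
  have hcperm : (pvCounts s).Perm (pvCounts ids) := by
    unfold pvCounts
    have : (PySem.Set.ofList s).map (fun k => (List.count k s : Int))
        = (PySem.Set.ofList s).map (fun k => (List.count k ids : Int)) := by
      refine List.map_congr_left ?_
      intro k _
      rw [hperm.count_eq]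
    rw [this]
    exact hsetperm.map _
  rw [h1, pvG_perm hcperm]
  exact max_eq_right (pvG_nonneg _)

-- ===== VERDICT (by name: the statement is the Claim_ definition above) =====
theorem seasons_at_one_club_py_spec : Claim_equal_seasons_at_one_club_py := by
  intro rows _
  show seasons_at_one_club_py rows = seasons_at_one_club_py_alt rows
  rw [pvA_eq, pvB_eq]
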